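-- pv_equiv track=rewrite | github.com/ahmadbasyouni10/Codepath-Technical-Interview-102-Session-Problems | main2.py | counting_pirates_action_minutes
-- ===== SOURCE A (Python) =====
-- from collections import defaultdict
--
-- def counting_pirates_action_minutes(logs, k):
--     hashmap = defaultdict(set)
--     for l in logs:
--         hashmap[l[0]].add(l[1])
--     res = [0] * (k)
--
--     for key in hashmap:
--         if len(hashmap[key]) > 0 and len(hashmap[key]) <= k:
--             res[len(hashmap[key])-1] += 1
--     return res
-- ===== SOURCE B (Python) =====
-- def counting_pirates_action_minutes(logs, k):
--     # Streaming one-pass: on each new distinct (pirate, minute) pair, move the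
--     # pirate from histogram bin c to bin c+1; read the answer off at the end.
--     seen = set()
--     counts = {}
--     hist = {}
--     for l in logs:
--         key = (l[0], l[1])
--         if key not in seen:
--             seen.add(key)
--             c = counts.get(l[0], 0)
--             if c:
--                 hist[c] -= 1
--             counts[l[0]] = c + 1
--             hist[c + 1] = hist.get(c + 1, 0) + 1
--     return [hist.get(i + 1, 0) for i in range(k)]
-- ===== Notes on version B (the rewrite author's own statement) =====
-- stated objective: alternative
-- what changed: Replaces A's batch dict-of-sets followed by a per-key scatter into a preallocated array with a streaming one-pass algorithm that, for each new distinct (pirate, minute) pair, moves the pirate between histogram bins by delta updates (hist[c] -= 1; hist[c+1] += 1), reading the answer off the maintained histogram at the end.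
import Mathlib
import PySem

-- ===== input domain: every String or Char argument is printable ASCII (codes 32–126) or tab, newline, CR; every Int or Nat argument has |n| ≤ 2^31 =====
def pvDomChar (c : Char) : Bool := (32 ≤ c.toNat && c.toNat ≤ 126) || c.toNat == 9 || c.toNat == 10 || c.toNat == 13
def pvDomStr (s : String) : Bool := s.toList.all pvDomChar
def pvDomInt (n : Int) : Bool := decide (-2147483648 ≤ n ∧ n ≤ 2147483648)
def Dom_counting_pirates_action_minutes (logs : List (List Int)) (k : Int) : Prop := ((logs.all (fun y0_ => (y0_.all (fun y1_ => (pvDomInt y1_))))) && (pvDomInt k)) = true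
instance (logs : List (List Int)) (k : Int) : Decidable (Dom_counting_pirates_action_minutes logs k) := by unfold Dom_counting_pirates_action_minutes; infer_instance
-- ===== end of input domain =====

-- B replaces A's batch dict-of-sets + per-key scatter by a streaming one-pass algorithm that
-- maintains the histogram incrementally with delta updates per new distinct (pirate, minute) pair.

-- l[i] of a log entry; under Pre_ (every log has ≥ 2 fields) indices 0 and 1 are in range, so the
-- default 0 is never used.
def pvFld (l : List Int) (i : Int) : Int := (PySem.List.pyGet? l i).getD 0

-- ===== PORT A =====
def counting_pirates_action_minutes (logs : List (List Int)) (k : Int) : List Int :=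
  let hashmap : PySem.Dict Int (PySem.Set Int) :=
    logs.foldl (fun d l =>
      d.modify (pvFld l 0) PySem.Set.empty (fun s => PySem.Set.add s (pvFld l 1)))
      PySem.Dict.empty
  let res : List Int := List.replicate k.toNat 0
  hashmap.keys.foldl (fun res key =>
    let n : Int := PySem.Set.len (hashmap.getD key PySem.Set.empty)
    if 0 < n ∧ n ≤ k then
      PySem.List.pySetD res (n - 1) (PySem.List.pyGetD res (n - 1) 0 + 1)
    else res) res

-- ===== PORT B =====
-- loop body of Source B: state = (seen, counts, hist)
def pvStep (st : PySem.Set (Int × Int) × PySem.Dict Int Int × PySem.Dict Int Int)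
    (l : List Int) : PySem.Set (Int × Int) × PySem.Dict Int Int × PySem.Dict Int Int :=
  let key := (pvFld l 0, pvFld l 1)
  if PySem.Set.contains st.1 key then st
  else
    let seen := PySem.Set.add st.1 key
    let c := st.2.1.getD (pvFld l 0) 0
    -- Python's `hist[c] -= 1`: the key c is present whenever c ≠ 0 (it was inserted when some
    -- pirate reached count c), so insert-with-getD overwrites it in place, exactly Python.
    let hist := if c ≠ 0 then st.2.2.insert c (st.2.2.getD c 0 - 1) else st.2.2
    let counts := st.2.1.insert (pvFld l 0) (c + 1)
    (seen, counts, hist.insert (c + 1) (hist.getD (c + 1) 0 + 1))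

def counting_pirates_action_minutes_alt (logs : List (List Int)) (k : Int) : List Int :=
  let st := logs.foldl pvStep (PySem.Set.empty, PySem.Dict.empty, PySem.Dict.empty)
  (List.range k.toNat).map (fun i : Nat => st.2.2.getD ((i : Int) + 1) 0)

-- ===== PRECONDITION & SPEC =====
-- Python A reads l[0] and l[1] of every log entry and raises IndexError on a shorter entry;
-- Pre_ admits exactly the inputs where every entry has at least two fields.
def Pre_counting_pirates_action_minutes (logs : List (List Int)) (k : Int) : Prop :=
  ∀ l ∈ logs, 2 ≤ l.length
instance (logs : List (List Int)) (k : Int) : Decidable (Pre_counting_pirates_action_minutes logs k) := by unfold Pre_counting_pirates_action_minutes; infer_instance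
def pvWitness_counting_pirates_action_minutes : List (List Int) × Int := ([[1, 2], [1, 3], [2, 2]], 3)

def Spec_counting_pirates_action_minutes (logs : List (List Int)) (k : Int) (out : List Int) : Prop := out = counting_pirates_action_minutes_alt logs k
instance (logs : List (List Int)) (k : Int) (out : List Int) : Decidable (Spec_counting_pirates_action_minutes logs k out) := by unfold Spec_counting_pirates_action_minutes; infer_instance

-- ===== CLAIM (what is proved, stated in full; the proofs are below) =====
def Claim_equal_counting_pirates_action_minutes : Prop := ∀ (logs : List (List Int)) (k : Int), Dom_counting_pirates_action_minutes logs k → Pre_counting_pirates_action_minutes logs k → Spec_counting_pirates_action_minutes logs k (counting_pirates_action_minutes logs k)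

-- ===== LEMMAS AND PROOFS =====

-- the pair each log entry contributes
def pvPair (l : List Int) : Int × Int := (pvFld l 0, pvFld l 1)

-- number of distinct pirates whose distinct-minute count is c, read off a flat list fs of
-- (one first-field per distinct pair)
def pvCnt (fs : List Int) (c : Int) : Nat :=
  (PySem.Set.ofList fs).countP (fun p => ((fs.count p : Int) == c))

-- the loop invariant of B's single pass
def pvInv (st : PySem.Set (Int × Int) × PySem.Dict Int Int × PySem.Dict Int Int) : Prop :=
  st.1.Nodup ∧
  (∀ p : Int, st.2.1.getD p 0 = ((st.1.map Prod.fst).count p : Int)) ∧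
  (∀ c : Int, c ≠ 0 → st.2.2.getD c 0 = (pvCnt (st.1.map Prod.fst) c : Int))

-- A's defaultdict lookup: the set stored at p is the (deduplicated) list of second fields of the
-- entries whose first field is p.
theorem pv_getD_foldl_modify_setadd (logs : List (List Int)) (d : PySem.Dict Int (PySem.Set Int)) (p : Int) :
    (logs.foldl (fun d l =>
        d.modify (pvFld l 0) PySem.Set.empty (fun s => PySem.Set.add s (pvFld l 1))) d).getD p PySem.Set.empty
      = PySem.Set.update (d.getD p PySem.Set.empty)
          ((logs.filter (fun l => pvFld l 0 == p)).map (fun l => pvFld l 1)) := by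
  induction logs generalizing d with
  | nil => simp [PySem.Set.update]
  | cons l rest ih =>
    simp only [List.foldl_cons, List.filter_cons]
    rw [ih, PySem.Dict.getD_modify]
    by_cases hp : pvFld l 0 = p
    · simp [hp, PySem.Set.update]
    · simp [hp, Ne.symm hp]

-- the per-pirate distinct-minute count computed by A equals the count of that pirate in the
-- first-fields of the deduplicated pairs
theorem pv_count_eq (logs : List (List Int)) (p : Int) :
    (PySem.Set.ofList ((logs.filter (fun l => pvFld l 0 == p)).map (fun l => pvFld l 1))).length
      = ((PySem.Set.ofList (logs.map pvPair)).map (fun q => q.1)).count p := by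
  classical
  have hR : ((PySem.Set.ofList (logs.map pvPair)).map (fun q => q.1)).count p
      = ((PySem.Set.ofList (logs.map pvPair)).filter (fun q => q.1 == p)).length := by
    rw [List.count_eq_countP, List.countP_map, List.countP_eq_length_filter]
    rfl
  set L : List Int := PySem.Set.ofList ((logs.filter (fun l => pvFld l 0 == p)).map (fun l => pvFld l 1)) with hL
  have hLnodup : L.Nodup := PySem.Set.nodup_ofList _
  have hmap_nodup : (L.map (fun x => (p, x))).Nodup := by
    refine List.Nodup.map ?_ hLnodup
    intro a b h; exact congrArg Prod.snd h
  have hfil_nodup : ((PySem.Set.ofList (logs.map pvPair)).filter (fun q => q.1 == p)).Nodup :=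
    (PySem.Set.nodup_ofList _).filter _
  have hmemL : ∀ x, x ∈ L ↔ (p, x) ∈ logs.map pvPair := by
    intro x
    rw [hL, PySem.Set.mem_ofList]
    constructor
    · rintro hx
      rcases List.mem_map.1 hx with ⟨l, hl, rfl⟩
      rcases List.mem_filter.1 hl with ⟨hlm, hlp⟩
      have : pvFld l 0 = p := by simpa using hlp
      exact List.mem_map.2 ⟨l, hlm, by simp [pvPair, this]⟩
    · intro hx
      rcases List.mem_map.1 hx with ⟨l, hl, hpl⟩
      have h0 : pvFld l 0 = p := by simpa [pvPair] using congrArg Prod.fst hpl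
      have h1 : pvFld l 1 = x := by simpa [pvPair] using congrArg Prod.snd hpl
      exact List.mem_map.2 ⟨l, List.mem_filter.2 ⟨hl, by simp [h0]⟩, h1⟩
  have hperm : ((PySem.Set.ofList (logs.map pvPair)).filter (fun q => q.1 == p)).Perm
      (L.map (fun x => (p, x))) := by
    rw [List.perm_ext_iff_of_nodup hfil_nodup hmap_nodup]
    intro q
    rw [List.mem_filter, PySem.Set.mem_ofList]
    constructor
    · rintro ⟨hq, hq1⟩
      have hq1' : q.1 = p := by simpa using hq1
      refine List.mem_map.2 ⟨q.2, (hmemL q.2).2 ?_, by simp [← hq1']⟩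
      simpa [← hq1'] using hq
    · intro hq
      rcases List.mem_map.1 hq with ⟨x, hx, rfl⟩
      exact ⟨(hmemL x).1 hx, by simp⟩
  rw [hR, hperm.length_eq, List.length_map]

-- length is preserved by A's scatter loop
theorem pv_scatter_length (k : Int) (f : Int → Int) (K : List Int) (res : List Int) :
    (K.foldl (fun r q =>
        if 0 < f q ∧ f q ≤ k then
          PySem.List.pySetD r (f q - 1) (PySem.List.pyGetD r (f q - 1) 0 + 1)
        else r) res).length = res.length := by
  induction K generalizing res with
  | nil => rfl
  | cons q K ih =>
    simp only [List.foldl_cons]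
    rw [ih]
    split
    · exact PySem.List.length_pySetD _ _ _
    · rfl

-- A's scatter loop computed pointwise: bin i counts the keys whose count is i+1
theorem pv_scatter_getD (k : Int) (f : Int → Int) (K : List Int) (res : List Int)
    (hlen : (res.length : Int) = max k 0) (i : Nat) (hi : i < res.length) :
    PySem.List.pyGetD
      (K.foldl (fun r q =>
        if 0 < f q ∧ f q ≤ k then
          PySem.List.pySetD r (f q - 1) (PySem.List.pyGetD r (f q - 1) 0 + 1)
        else r) res) (i : Int) 0
      = PySem.List.pyGetD res (i : Int) 0 + ((K.map f).count ((i : Int) + 1) : Nat) := by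
  induction K generalizing res with
  | nil => simp
  | cons q K ih =>
    simp only [List.foldl_cons, List.map_cons]
    by_cases hg : 0 < f q ∧ f q ≤ k
    · have hidx : (0 : Int) ≤ f q - 1 := by omega
      have hidxlt : (f q - 1).toNat < res.length := by omega
      rw [if_pos hg]
      have hlen' : ((PySem.List.pySetD res (f q - 1) (PySem.List.pyGetD res (f q - 1) 0 + 1)).length : Int) = max k 0 := by
        rw [PySem.List.length_pySetD]; exact hlen
      rw [ih _ hlen' (by rw [PySem.List.length_pySetD]; exact hi)]
      rw [PySem.List.pySetD_of_nonneg _ _ hidx]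
      by_cases hq : f q = (i : Int) + 1
      · have hij : (f q - 1).toNat = i := by omega
        rw [List.count_cons]
        have : PySem.List.pyGetD (res.set (f q - 1).toNat (PySem.List.pyGetD res (f q - 1) 0 + 1)) (i : Int) 0
            = PySem.List.pyGetD res (f q - 1) 0 + 1 := by
          rw [PySem.List.pyGetD_natCast, hij, List.getD_eq_getElem?_getD, List.getElem?_set_self (by omega)]
          simp
        rw [this]
        have : PySem.List.pyGetD res (f q - 1) 0 = PySem.List.pyGetD res (i : Int) 0 := by
          congr 1; omega
        rw [this]
        simp [hq]
        ring
      · have hij : (f q - 1).toNat ≠ i := by omega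
        rw [List.count_cons]
        have : PySem.List.pyGetD (res.set (f q - 1).toNat (PySem.List.pyGetD res (f q - 1) 0 + 1)) (i : Int) 0
            = PySem.List.pyGetD res (i : Int) 0 := by
          rw [PySem.List.pyGetD_natCast, PySem.List.pyGetD_natCast, List.getD_eq_getElem?_getD,
            List.getD_eq_getElem?_getD, List.getElem?_set_ne (by omega)]
        rw [this]
        simp [hq]
    · rw [if_neg hg, ih _ hlen hi, List.count_cons]
      have hq : ¬ f q = (i : Int) + 1 := by
        intro h
        exact hg ⟨by omega, by omega⟩
      simp [hq]

-- A's key list is a permutation of the distinct first fields of the distinct pairs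
theorem pv_keys_perm (logs : List (List Int)) :
    (PySem.Set.ofList (logs.map (fun l => pvFld l 0))).Perm
      (PySem.Set.ofList ((PySem.Set.ofList (logs.map pvPair)).map (fun q => q.1))) := by
  rw [List.perm_ext_iff_of_nodup (PySem.Set.nodup_ofList _) (PySem.Set.nodup_ofList _)]
  intro x
  rw [PySem.Set.mem_ofList, PySem.Set.mem_ofList]
  constructor
  · intro hx
    rcases List.mem_map.1 hx with ⟨l, hl, rfl⟩
    exact List.mem_map.2 ⟨pvPair l, PySem.Set.mem_ofList _ _ |>.2 (List.mem_map.2 ⟨l, hl, rfl⟩), rfl⟩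
  · intro hx
    rcases List.mem_map.1 hx with ⟨q, hq, rfl⟩
    rcases List.mem_map.1 ((PySem.Set.mem_ofList _ _).1 hq) with ⟨l, hl, rfl⟩
    exact List.mem_map.2 ⟨l, hl, rfl⟩

-- countP of a list after changing the predicate at exactly one (nodup) member
theorem pv_countP_update (S : List Int) (hS : S.Nodup) (p0 : Int) (hp : p0 ∈ S)
    (f g : Int → Bool) (hcong : ∀ q ∈ S, q ≠ p0 → f q = g q) :
    (S.countP f : Int) = (S.countP g : Int)
      + (if f p0 then 1 else 0) - (if g p0 then 1 else 0) := by
  have hperm : S.Perm (p0 :: S.erase p0) := List.perm_cons_erase hp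
  have hne : ∀ q ∈ S.erase p0, q ≠ p0 := by
    intro q hq
    exact ((List.Nodup.mem_erase_iff hS).1 hq).1
  have hcongr : (S.erase p0).countP f = (S.erase p0).countP g := by
    refine List.countP_congr ?_
    intro q hq
    simp [hcong q (List.mem_of_mem_erase hq) (hne q hq)]
  rw [hperm.countP_eq f, hperm.countP_eq g, List.countP_cons, List.countP_cons, hcongr]
  split_ifs <;> push_cast <;> omega

-- the first component of B's step always adds the pair
theorem pv_step_fst (st : PySem.Set (Int × Int) × PySem.Dict Int Int × PySem.Dict Int Int)
    (l : List Int) : (pvStep st l).1 = PySem.Set.add st.1 (pvPair l) := by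
  unfold pvStep
  by_cases h : PySem.Set.contains st.1 (pvFld l 0, pvFld l 1)
  · rw [if_pos h, PySem.Set.add_of_mem (by simpa [PySem.Set.contains_iff, pvPair] using h)]
  · rw [if_neg h]
    rfl

-- B's step preserves the invariant
theorem pv_step_inv (st : PySem.Set (Int × Int) × PySem.Dict Int Int × PySem.Dict Int Int)
    (l : List Int) (h : pvInv st) : pvInv (pvStep st l) := by
  classical
  obtain ⟨hnd, hcounts, hhist⟩ := h
  unfold pvStep
  by_cases hmem : PySem.Set.contains st.1 (pvFld l 0, pvFld l 1)
  · rw [if_pos hmem]; exact ⟨hnd, hcounts, hhist⟩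
  · rw [if_neg hmem]
    have hkey : (pvFld l 0, pvFld l 1) ∉ st.1 := by
      simpa [PySem.Set.contains_iff] using hmem
    set p0 := pvFld l 0 with hp0
    set fs := st.1.map Prod.fst with hfs
    have hadd : PySem.Set.add st.1 (p0, pvFld l 1) = st.1 ++ [(p0, pvFld l 1)] :=
      PySem.Set.add_of_not_mem hkey
    have hfs' : (PySem.Set.add st.1 (p0, pvFld l 1)).map Prod.fst = fs ++ [p0] := by
      rw [hadd]; simp [hfs]
    have hc0 : st.2.1.getD p0 0 = (fs.count p0 : Int) := hcounts p0
    have hcount' : ∀ q : Int, (fs ++ [p0]).count q = fs.count q + (if p0 = q then 1 else 0) := by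
      intro q
      rw [List.count_append]
      by_cases h : p0 = q
      · subst h; simp
      · simp [h]
    refine ⟨?_, ?_, ?_⟩
    · -- seen stays Nodup
      simpa [hadd] using (List.Nodup.append hnd (List.nodup_singleton _)
        (by simpa [List.disjoint_singleton] using hkey))
    · -- counts
      intro p
      simp only [hfs']
      rw [PySem.Dict.getD_insert]
      by_cases hp : p = p0
      · subst hp
        rw [if_pos rfl, hc0, hcount']
        simp
      · rw [if_neg hp, hcounts p, hcount']
        simp [Ne.symm hp]
    · -- hist
      intro c hc
      simp only [hfs']
      have hc0nn : (0 : Int) ≤ st.2.1.getD p0 0 := by rw [hc0]; positivity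
      have hc01 : st.2.1.getD p0 0 + 1 ≠ 0 := by omega
      -- the value read by the final insert
      have hh1 : ∀ x : Int, x ≠ 0 →
          (if st.2.1.getD p0 0 ≠ 0 then st.2.2.insert (st.2.1.getD p0 0) (st.2.2.getD (st.2.1.getD p0 0) 0 - 1) else st.2.2).getD x 0
            = (if st.2.1.getD p0 0 ≠ 0 ∧ x = st.2.1.getD p0 0 then (pvCnt fs (st.2.1.getD p0 0) : Int) - 1 else (pvCnt fs x : Int)) := by
        intro x hx
        by_cases hz : st.2.1.getD p0 0 = 0
        · rw [if_neg (fun h => h hz), if_neg (by simp [hz])]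
          exact hhist x hx
        · rw [if_pos hz, PySem.Dict.getD_insert]
          by_cases hxe : x = st.2.1.getD p0 0
          · rw [if_pos hxe, if_pos ⟨hz, hxe⟩, hhist _ hz]
          · rw [if_neg hxe, if_neg (by tauto), hhist x hx]
      rw [PySem.Dict.getD_insert]
      -- relate pvCnt (fs ++ [p0]) c to pvCnt fs
      have hmain : (pvCnt (fs ++ [p0]) c : Int)
          = (pvCnt fs c : Int)
            + (if ((fs.count p0 : Int) + 1 == c) then 1 else 0)
            - (if st.2.1.getD p0 0 ≠ 0 ∧ ((fs.count p0 : Int) == c) then 1 else 0) := by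
        by_cases hin : p0 ∈ fs
        · have hSmem : p0 ∈ PySem.Set.ofList fs := (PySem.Set.mem_ofList _ _).2 hin
          have hS' : PySem.Set.ofList (fs ++ [p0]) = PySem.Set.ofList fs := by
            rw [PySem.Set.ofList_append_singleton, PySem.Set.add_of_mem hSmem]
          have hcz : st.2.1.getD p0 0 ≠ 0 := by
            rw [hc0]
            have : 0 < fs.count p0 := List.count_pos_iff.2 hin
            omega
          unfold pvCnt
          rw [hS']
          have := pv_countP_update (PySem.Set.ofList fs) (PySem.Set.nodup_ofList fs) p0 hSmem
            (fun q => (((fs ++ [p0]).count q : Int) == c))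
            (fun q => ((fs.count q : Int) == c))
            (by
              intro q _ hq
              simp only [hcount' q]
              simp [Ne.symm hq])
          rw [this]
          simp only [hcount', beq_iff_eq, if_true]
          push_cast
          split_ifs <;> omega
        · have hSmem : p0 ∉ PySem.Set.ofList fs := fun h => hin ((PySem.Set.mem_ofList _ _).1 h)
          have hS' : PySem.Set.ofList (fs ++ [p0]) = PySem.Set.ofList fs ++ [p0] := by
            rw [PySem.Set.ofList_append_singleton, PySem.Set.add_of_not_mem hSmem]
          have hcz : st.2.1.getD p0 0 = 0 := by
            rw [hc0, List.count_eq_zero_of_not_mem hin]; rfl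
          have hcnt0 : fs.count p0 = 0 := List.count_eq_zero_of_not_mem hin
          unfold pvCnt
          rw [hS', List.countP_append]
          have hsame : (PySem.Set.ofList fs).countP (fun q => (((fs ++ [p0]).count q : Int) == c))
              = (PySem.Set.ofList fs).countP (fun q => ((fs.count q : Int) == c)) := by
            refine List.countP_congr ?_
            intro q hq
            have hqfs : q ∈ fs := (PySem.Set.mem_ofList _ _).1 hq
            have hqne : p0 ≠ q := fun h => hin (h ▸ hqfs)
            simp only [hcount' q]
            simp [hqne]
          rw [hsame]
          simp only [List.countP_cons, List.countP_nil, hcount' p0, hcnt0, beq_iff_eq,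
            if_true, hcz]
          push_cast
          split_ifs <;> simp_all
      -- now case on which bin c is
      have hn0 : st.2.1.getD p0 0 = ((fs.count p0 : Nat) : Int) := hc0
      by_cases hce : c = st.2.1.getD p0 0 + 1
      · rw [if_pos hce, hh1 _ hc01, if_neg (by omega), hmain, ← hce,
          if_pos (show ((fs.count p0 : Int) + 1 == c) = true by rw [beq_iff_eq]; omega),
          if_neg (show ¬ (st.2.1.getD p0 0 ≠ 0 ∧ ((fs.count p0 : Int) == c) = true) from by
            rintro ⟨hz, hq⟩
            have : (fs.count p0 : Int) = c := eq_of_beq hq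
            omega)]
        ring
      · rw [if_neg hce, hh1 c hc, hmain,
          if_neg (show ¬ ((fs.count p0 : Int) + 1 == c) = true from by
            intro hq
            have : (fs.count p0 : Int) + 1 = c := eq_of_beq hq
            omega)]
        by_cases hcc : st.2.1.getD p0 0 ≠ 0 ∧ c = st.2.1.getD p0 0
        · rw [if_pos hcc, if_pos (show (st.2.1.getD p0 0 ≠ 0 ∧ ((fs.count p0 : Int) == c) = true) from
            ⟨hcc.1, by rw [beq_iff_eq]; omega⟩), ← hcc.2]
          ring
        · rw [if_neg hcc,
            if_neg (show ¬ (st.2.1.getD p0 0 ≠ 0 ∧ ((fs.count p0 : Int) == c) = true) from by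
              rintro ⟨hz, hq⟩
              have : (fs.count p0 : Int) = c := eq_of_beq hq
              exact hcc ⟨hz, by omega⟩)]
          ring

-- B's fold keeps the invariant and its seen component is the deduplicated pair list
theorem pv_fold_inv (logs : List (List Int))
    (st : PySem.Set (Int × Int) × PySem.Dict Int Int × PySem.Dict Int Int) (h : pvInv st) :
    pvInv (logs.foldl pvStep st) := by
  induction logs generalizing st with
  | nil => exact h
  | cons l rest ih => exact ih _ (pv_step_inv st l h)

theorem pv_fold_fst (logs : List (List Int))
    (st : PySem.Set (Int × Int) × PySem.Dict Int Int × PySem.Dict Int Int) :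
    (logs.foldl pvStep st).1 = PySem.Set.update st.1 (logs.map pvPair) := by
  rw [PySem.Set.update_map_eq_foldl_add]
  induction logs generalizing st with
  | nil => rfl
  | cons l rest ih =>
    simp only [List.foldl_cons]
    rw [ih, pv_step_fst]

-- ===== VERDICT (by name: the statement is the Claim_ definition above) =====
theorem counting_pirates_action_minutes_spec : Claim_equal_counting_pirates_action_minutes := by
  intro logs k _ _
  unfold Spec_counting_pirates_action_minutes
  simp only [counting_pirates_action_minutes, counting_pirates_action_minutes_alt]
  set stF := logs.foldl pvStep (PySem.Set.empty, PySem.Dict.empty, PySem.Dict.empty) with hstF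
  have hinv : pvInv stF := pv_fold_inv logs _ (by
    refine ⟨List.nodup_nil, ?_, ?_⟩
    · intro p; simp [PySem.Dict.getD_empty]
    · intro c hc; simp [PySem.Dict.getD_empty, pvCnt, PySem.Set.ofList])
  have hseen : stF.1 = PySem.Set.ofList (logs.map pvPair) := by
    rw [hstF, pv_fold_fst]
    rfl
  -- the per-key count A uses equals the count of the key in the dedup'd pair firsts
  have hcount : ∀ p, PySem.Set.len
      ((logs.foldl (fun d l =>
          d.modify (pvFld l 0) PySem.Set.empty (fun s => PySem.Set.add s (pvFld l 1)))
          PySem.Dict.empty).getD p PySem.Set.empty)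
      = (((PySem.Set.ofList (logs.map pvPair)).map (fun q => q.1)).count p : Int) := by
    intro p
    rw [pv_getD_foldl_modify_setadd]
    have hupd : PySem.Set.update ((PySem.Dict.empty : PySem.Dict Int (PySem.Set Int)).getD p PySem.Set.empty)
        ((logs.filter (fun l => pvFld l 0 == p)).map (fun l => pvFld l 1))
        = PySem.Set.ofList ((logs.filter (fun l => pvFld l 0 == p)).map (fun l => pvFld l 1)) := rfl
    rw [hupd]
    have h := pv_count_eq logs p
    simp only [PySem.Set.len]
    exact_mod_cast h
  -- A's key list
  have hkeys : (logs.foldl (fun d l =>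
        d.modify (pvFld l 0) PySem.Set.empty (fun s => PySem.Set.add s (pvFld l 1)))
        PySem.Dict.empty).keys
      = PySem.Set.ofList (logs.map (fun l => pvFld l 0)) := by
    have := PySem.Dict.keys_foldl_modify_key logs (fun l => pvFld l 0) PySem.Set.empty
      (fun _ l s => PySem.Set.add s (pvFld l 1)) PySem.Dict.empty
    simpa [PySem.Set.update, PySem.Set.ofList] using this
  -- both sides are lists of length k.toNat; compare pointwise
  apply List.ext_getElem
  · rw [pv_scatter_length]
    simp
  · intro i hi1 hi2
    have hilen : i < (List.replicate k.toNat (0 : Int)).length := by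
      rw [pv_scatter_length] at hi1; exact hi1
    have hik : i < k.toNat := by simpa using hilen
    have hlenr : ((List.replicate k.toNat (0 : Int)).length : Int) = max k 0 := by
      simp
    have hA := pv_scatter_getD k
      (fun p => PySem.Set.len
        ((logs.foldl (fun d l =>
            d.modify (pvFld l 0) PySem.Set.empty (fun s => PySem.Set.add s (pvFld l 1)))
            PySem.Dict.empty).getD p PySem.Set.empty))
      (logs.foldl (fun d l =>
          d.modify (pvFld l 0) PySem.Set.empty (fun s => PySem.Set.add s (pvFld l 1)))
          PySem.Dict.empty).keys
      (List.replicate k.toNat (0 : Int)) hlenr i hilen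
    rw [← List.getD_eq_getElem _ 0 hi1, ← PySem.List.pyGetD_natCast, hA]
    have hz : PySem.List.pyGetD (List.replicate k.toNat (0 : Int)) (i : Int) 0 = 0 := by
      rw [PySem.List.pyGetD_natCast]
      simp [List.getD_eq_getElem?_getD, hik]
    rw [hz]
    rw [List.getElem_map, List.getElem_range]
    -- B's bin i from the invariant
    have hB : stF.2.2.getD ((i : Int) + 1) 0 = (pvCnt (stF.1.map Prod.fst) ((i : Int) + 1) : Int) :=
      hinv.2.2 _ (by omega)
    rw [hB, hseen]
    -- A's count of (i+1) over keys mapped through the per-key size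
    have hmapc : ((logs.foldl (fun d l =>
          d.modify (pvFld l 0) PySem.Set.empty (fun s => PySem.Set.add s (pvFld l 1)))
          PySem.Dict.empty).keys.map
            (fun p => PySem.Set.len
              ((logs.foldl (fun d l =>
                  d.modify (pvFld l 0) PySem.Set.empty (fun s => PySem.Set.add s (pvFld l 1)))
                  PySem.Dict.empty).getD p PySem.Set.empty))).count ((i : Int) + 1)
        = pvCnt ((PySem.Set.ofList (logs.map pvPair)).map (fun q => q.1)) ((i : Int) + 1) := by
      rw [List.count_eq_countP, List.countP_map]
      unfold pvCnt
      have hperm : ((logs.foldl (fun d l =>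
          d.modify (pvFld l 0) PySem.Set.empty (fun s => PySem.Set.add s (pvFld l 1)))
          PySem.Dict.empty).keys).Perm
          (PySem.Set.ofList ((PySem.Set.ofList (logs.map pvPair)).map (fun q => q.1))) := by
        rw [hkeys]; exact pv_keys_perm logs
      rw [hperm.countP_eq]
      refine List.countP_congr ?_
      intro q _
      simp only [Function.comp]
      rw [hcount q]
    rw [hmapc]
    simp
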